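-- pv_equiv track=rewrite | github.com/manojshankar/hackerRank | algorithms/greedy/jim_and_the_orders.py | jimOrders
-- ===== SOURCE A (Python) =====
-- def jimOrders(orders):
--     # calculate serve time for each order and create dict
--     sevTime = {}
--     index = 1
--     for order in orders:
--         key = order[0] + order[1]
--         if key in sevTime:
--             sevTime[key] = [sevTime[key], index]
--         else:
--             sevTime[key] = index
--         index += 1
--     deliver = []
--     for key in sorted(sevTime.keys()):
--         deliver.append(sevTime[key])
--     out = []
--     flatten(deliver, out)
--     return out
--
-- def flatten(items, output):
--     for i in items:
--         if type(i) == list: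
--             flatten(i, output)
--         else:
--             output.append(i)
-- ===== SOURCE B (Python) =====
-- def jimOrders(orders):
--     pairs = sorted((order[0] + order[1], i) for i, order in enumerate(orders, 1))
--     return [i for _, i in pairs]
-- ===== Notes on version B (the rewrite author's own statement) =====
-- stated objective: idiomatic
-- what changed: Replaces the grouping dict with nested-list tie accumulation plus a recursive flatten by a single stable lexicographic sort of (serve_time, 1-based index) pairs built with enumerate, extracting the indices.
import Mathlib
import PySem

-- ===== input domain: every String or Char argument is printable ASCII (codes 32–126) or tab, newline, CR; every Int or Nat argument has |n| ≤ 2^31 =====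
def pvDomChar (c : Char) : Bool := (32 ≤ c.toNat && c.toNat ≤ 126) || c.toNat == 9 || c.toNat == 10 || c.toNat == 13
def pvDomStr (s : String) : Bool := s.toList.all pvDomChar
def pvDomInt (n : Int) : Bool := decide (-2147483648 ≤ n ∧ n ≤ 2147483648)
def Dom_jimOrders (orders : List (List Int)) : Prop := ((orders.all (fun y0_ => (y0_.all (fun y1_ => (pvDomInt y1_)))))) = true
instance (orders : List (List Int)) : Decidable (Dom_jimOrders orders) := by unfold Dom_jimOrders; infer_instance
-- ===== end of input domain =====

-- B replaces A's grouping dict (nested-list tie accumulation + recursive flatten) by one stable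
-- lexicographic sort of (serve_time, 1-based index) pairs; objective: idiomatic, same O(n log n).

-- ===== PORT A =====
-- A's dict values are either an index or a nested 2-list [older_value, index]: a binary tree.
inductive PvTree where
  | leaf : Int → PvTree
  | node : PvTree → PvTree → PvTree
deriving Repr, DecidableEq

-- Python's flatten(items, output) applied to one such value
def pvFlatten (t : PvTree) : List Int :=
  match t with
  | .leaf i => [i]
  | .node l r => pvFlatten l ++ pvFlatten r

-- key = order[0] + order[1]; Pre_ excludes orders with fewer than 2 entries, so pyGet? is some
def pvKeyOf (order : List Int) : Int :=
  (PySem.List.pyGet? order 0).getD 0 + (PySem.List.pyGet? order 1).getD 0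

-- one iteration of A's first loop: dict update + index += 1
def pvStepA (st : PySem.Dict Int PvTree × Int) (order : List Int) : PySem.Dict Int PvTree × Int :=
  let key := pvKeyOf order
  match st.1.get? key with
  | some t => (st.1.insert key (PvTree.node t (PvTree.leaf st.2)), st.2 + 1)
  | none   => (st.1.insert key (PvTree.leaf st.2), st.2 + 1)

def jimOrders (orders : List (List Int)) : List Int :=
  let st := orders.foldl pvStepA (PySem.Dict.empty, 1)
  -- deliver.append(sevTime[key]) over sorted keys (key is present, so getD's default is unused)
  let deliver := (PySem.List.sorted st.1.keys (fun k => k)).foldl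
      (fun acc k => acc ++ [st.1.getD k (PvTree.leaf 0)]) []
  -- flatten(deliver, out)
  deliver.foldl (fun out t => out ++ pvFlatten t) []

-- ===== PORT B =====
def jimOrders_alt (orders : List (List Int)) : List Int :=
  -- pairs = sorted((order[0]+order[1], i) for i, order in enumerate(orders, 1))  (tuple sort = sorted2)
  let pairs := PySem.List.sorted2
      ((PySem.List.enumerate orders 1).map (fun io =>
        ((PySem.List.pyGet? io.2 0).getD 0 + (PySem.List.pyGet? io.2 1).getD 0, io.1)))
      (fun p => p.1) (fun p => p.2)
  pairs.map (fun p => p.2)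

-- ===== PRECONDITION & SPEC =====
-- Pre_: every order has at least two entries; otherwise Python A (and B) raise IndexError on order[1].
def Pre_jimOrders (orders : List (List Int)) : Prop := ∀ o ∈ orders, 2 ≤ o.length
instance (orders : List (List Int)) : Decidable (Pre_jimOrders orders) := by
  unfold Pre_jimOrders; infer_instance

def pvWitness_jimOrders : List (List Int) := [[3, 2], [2, 1], [1, 2], [4, 4]]

def Spec_jimOrders (orders : List (List Int)) (out : List Int) : Prop := out = jimOrders_alt orders
instance (orders : List (List Int)) (out : List Int) : Decidable (Spec_jimOrders orders out) := by
  unfold Spec_jimOrders; infer_instance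

-- ===== CLAIM (what is proved, stated in full; the proofs are below) =====
def Claim_equal_jimOrders : Prop :=
  ∀ (orders : List (List Int)), Dom_jimOrders orders → Pre_jimOrders orders →
    Spec_jimOrders orders (jimOrders orders)

-- ===== LEMMAS AND PROOFS =====

-- the (serve_time, index) pairs, index starting at i (proof-side description of A's first loop)
def pvPairsFrom (orders : List (List Int)) (i : Int) : List (Int × Int) :=
  match orders with
  | [] => []
  | o :: t => (pvKeyOf o, i) :: pvPairsFrom t (i + 1)

-- the indices recorded in the dict under key k, in order
def pvBucket (d : PySem.Dict Int PvTree) (k : Int) : List Int :=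
  match d.get? k with
  | some t => pvFlatten t
  | none => []

lemma pvPairsFrom_eq_enumerate (orders : List (List Int)) (i : Int) :
    pvPairsFrom orders i =
      (PySem.List.enumerate orders i).map (fun io =>
        ((PySem.List.pyGet? io.2 0).getD 0 + (PySem.List.pyGet? io.2 1).getD 0, io.1)) := by
  induction orders generalizing i with
  | nil => rfl
  | cons o t ih =>
      simp only [pvPairsFrom, PySem.List.enumerate, List.map_cons, pvKeyOf]
      rw [ih (i + 1)]

lemma pvPairsFrom_snd_lb (orders : List (List Int)) (i : Int) :
    ∀ p ∈ pvPairsFrom orders i, i ≤ p.2 := by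
  induction orders generalizing i with
  | nil => intro p hp; simp [pvPairsFrom] at hp
  | cons o t ih =>
      intro p hp
      simp only [pvPairsFrom, List.mem_cons] at hp
      rcases hp with rfl | hp
      · simp
      · have := ih (i + 1) p hp; omega

lemma pvPairsFrom_snd_pairwise (orders : List (List Int)) (i : Int) :
    (pvPairsFrom orders i).Pairwise (fun a b => a.2 < b.2) := by
  induction orders generalizing i with
  | nil => exact List.Pairwise.nil
  | cons o t ih =>
      refine List.Pairwise.cons ?_ (ih (i + 1))
      intro p hp
      have := pvPairsFrom_snd_lb t (i + 1) p hp
      omega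

-- A's first loop: final buckets and key set, by induction over the remaining orders
lemma pvFoldA_inv (xs : List (List Int)) (d : PySem.Dict Int PvTree) (i : Int)
    (hnd : d.keys.Nodup) :
    (xs.foldl pvStepA (d, i)).1.keys.Nodup ∧
    (∀ k, pvBucket (xs.foldl pvStepA (d, i)).1 k =
        pvBucket d k ++ ((pvPairsFrom xs i).filter (fun p => p.1 == k)).map (fun p => p.2)) ∧
    (∀ k, k ∈ (xs.foldl pvStepA (d, i)).1.keys ↔
        k ∈ d.keys ∨ k ∈ (pvPairsFrom xs i).map (fun p => p.1)) := by
  induction xs generalizing d i with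
  | nil => simp [pvPairsFrom, hnd]
  | cons o t ih =>
      rcases hg : d.get? (pvKeyOf o) with _ | tr
      · -- key not yet present: insert leaf
        have hred : (o :: t).foldl pvStepA (d, i) =
            t.foldl pvStepA (d.insert (pvKeyOf o) (PvTree.leaf i), i + 1) := by
          simp only [List.foldl_cons, pvStepA, hg]
        have hnd1 : (d.insert (pvKeyOf o) (PvTree.leaf i)).keys.Nodup :=
          PySem.Dict.nodup_keys_insert _ _ _ hnd
        have hb1 : ∀ k, pvBucket (d.insert (pvKeyOf o) (PvTree.leaf i)) k =
            pvBucket d k ++ (if pvKeyOf o == k then [i] else []) := by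
          intro k
          by_cases hk : k = pvKeyOf o
          · subst hk
            unfold pvBucket
            simp [PySem.Dict.get?_insert_self, hg, pvFlatten]
          · unfold pvBucket
            rw [PySem.Dict.get?_insert_of_ne d _ hk]
            have hne : (pvKeyOf o == k) = false := by
              simp; exact fun hh => hk hh.symm
            simp [hne]
        obtain ⟨h1, h2, h3⟩ := ih (d.insert (pvKeyOf o) (PvTree.leaf i)) (i + 1) hnd1
        refine ⟨by rw [hred]; exact h1, ?_, ?_⟩
        · intro k
          rw [hred, h2 k, hb1 k]
          simp only [pvPairsFrom, List.filter_cons]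
          by_cases hk : (pvKeyOf o == k) <;> simp [hk, List.append_assoc]
        · intro k
          rw [hred, h3 k]
          simp only [PySem.Dict.mem_keys_insert, pvPairsFrom, List.map_cons, List.mem_cons]
          tauto
      · -- key present: wrap the old value in a nested pair
        have hred : (o :: t).foldl pvStepA (d, i) =
            t.foldl pvStepA (d.insert (pvKeyOf o) (PvTree.node tr (PvTree.leaf i)), i + 1) := by
          simp only [List.foldl_cons, pvStepA, hg]
        have hnd1 : (d.insert (pvKeyOf o) (PvTree.node tr (PvTree.leaf i))).keys.Nodup :=
          PySem.Dict.nodup_keys_insert _ _ _ hnd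
        have hb1 : ∀ k, pvBucket (d.insert (pvKeyOf o) (PvTree.node tr (PvTree.leaf i))) k =
            pvBucket d k ++ (if pvKeyOf o == k then [i] else []) := by
          intro k
          by_cases hk : k = pvKeyOf o
          · subst hk
            unfold pvBucket
            simp [PySem.Dict.get?_insert_self, hg, pvFlatten]
          · unfold pvBucket
            rw [PySem.Dict.get?_insert_of_ne d _ hk]
            have hne : (pvKeyOf o == k) = false := by
              simp; exact fun hh => hk hh.symm
            simp [hne]
        obtain ⟨h1, h2, h3⟩ := ih (d.insert (pvKeyOf o) (PvTree.node tr (PvTree.leaf i))) (i + 1) hnd1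
        refine ⟨by rw [hred]; exact h1, ?_, ?_⟩
        · intro k
          rw [hred, h2 k, hb1 k]
          simp only [pvPairsFrom, List.filter_cons]
          by_cases hk : (pvKeyOf o == k) <;> simp [hk, List.append_assoc]
        · intro k
          rw [hred, h3 k]
          simp only [PySem.Dict.mem_keys_insert, pvPairsFrom, List.map_cons, List.mem_cons]
          tauto

-- the two insertion predicates of B's tuple sort and of a sort by the lexicographic key agree
lemma pvBefore_eq :
    (fun (a b : Int × Int) =>
        (decide (a.1 < b.1) || (!decide (b.1 < a.1) && decide (a.2 < b.2)))) =
    (fun (a b : Int × Int) => decide (toLex a < toLex b)) := by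
  funext a b
  simp only [Prod.Lex.toLex_lt_toLex]
  by_cases h1 : a.1 < b.1 <;> by_cases h2 : b.1 < a.1 <;> by_cases h3 : a.2 < b.2 <;>
    simp [h1, h2, h3] <;> omega

lemma pvSorted2_eq_sorted_lex (xs : List (Int × Int)) :
    PySem.List.sorted2 xs (fun p => p.1) (fun p => p.2) =
      PySem.List.sorted xs (fun p => toLex p) := by
  rw [PySem.List.sorted_eq_foldl_insertBy]
  show xs.foldl (fun acc x => PySem.List.insertBy
      (fun a b => (decide (a.1 < b.1) || (!decide (b.1 < a.1) && decide (a.2 < b.2)))) x acc) [] = _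
  rw [pvBefore_eq]

-- distributing a list over the distinct values of its first components is a permutation
lemma pvFlatMap_filter_perm (ks : List Int) (l : List (Int × Int))
    (hnd : ks.Nodup) (hcov : ∀ p ∈ l, p.1 ∈ ks) :
    (ks.flatMap (fun k => l.filter (fun p => p.1 == k))).Perm l := by
  induction ks generalizing l with
  | nil =>
      have : l = [] := by
        cases l with
        | nil => rfl
        | cons p t => exact absurd (hcov p (by simp)) (by simp)
      simp [this]
  | cons k ks ih =>
      simp only [List.flatMap_cons]
      have hnd' : ks.Nodup := hnd.of_cons
      have hknot : k ∉ ks := (List.nodup_cons.mp hnd).1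
      have hrest : ∀ k' ∈ ks, l.filter (fun p => p.1 == k') =
          (l.filter (fun p => !(p.1 == k))).filter (fun p => p.1 == k') := by
        intro k' hk'
        have hkk : k' ≠ k := fun hh => hknot (hh ▸ hk')
        rw [List.filter_filter]
        apply List.filter_congr
        intro p _
        by_cases h : p.1 = k'
        · simp only [h]
          simp [hkk]
        · simp [h]
      have hflat : ks.flatMap (fun k' => l.filter (fun p => p.1 == k')) =
          ks.flatMap (fun k' => (l.filter (fun p => !(p.1 == k))).filter (fun p => p.1 == k')) :=
        List.flatMap_congr hrest
      rw [hflat]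
      have hcov' : ∀ p ∈ l.filter (fun p => !(p.1 == k)), p.1 ∈ ks := by
        intro p hp
        rw [List.mem_filter] at hp
        have := hcov p hp.1
        simp only [List.mem_cons] at this
        rcases this with h | h
        · exact absurd h (by simpa using hp.2)
        · exact h
      exact ((ih _ hnd' hcov').append_left _).trans (List.filter_append_perm _ l)

-- the same distribution over strictly increasing keys is lexicographically strictly sorted
lemma pvFlatMap_filter_pairwise (ks : List Int) (l : List (Int × Int))
    (hks : ks.Pairwise (fun a b => a < b)) (hl : l.Pairwise (fun a b => a.2 < b.2)) :
    (ks.flatMap (fun k => l.filter (fun p => p.1 == k))).Pairwise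
      (fun a b => toLex a < toLex b) := by
  induction ks with
  | nil => exact List.Pairwise.nil
  | cons k ks ih =>
      simp only [List.flatMap_cons, List.pairwise_append]
      obtain ⟨hkks, hks'⟩ := List.pairwise_cons.mp hks
      refine ⟨?_, ih hks', ?_⟩
      · have hfil : (l.filter (fun p => p.1 == k)).Pairwise (fun a b => a.2 < b.2) :=
          hl.filter _
        refine hfil.imp_of_mem ?_
        intro a b ha hb hab
        have hak : a.1 = k := by simpa using (List.mem_filter.mp ha).2
        have hbk : b.1 = k := by simpa using (List.mem_filter.mp hb).2
        rw [Prod.Lex.toLex_lt_toLex]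
        exact Or.inr ⟨hak.trans hbk.symm, hab⟩
      · intro a ha b hb
        have hak : a.1 = k := by simpa using (List.mem_filter.mp ha).2
        obtain ⟨k', hk', hbf⟩ := List.mem_flatMap.mp hb
        have hbk : b.1 = k' := by simpa using (List.mem_filter.mp hbf).2
        rw [Prod.Lex.toLex_lt_toLex]
        exact Or.inl (by rw [hak, hbk]; exact hkks k' hk')

theorem jimOrders_spec : Claim_equal_jimOrders := by
  intro orders _hdom _hpre
  unfold Spec_jimOrders jimOrders jimOrders_alt
  dsimp only
  rw [show (PySem.List.enumerate orders 1).map (fun io =>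
        ((PySem.List.pyGet? io.2 0).getD 0 + (PySem.List.pyGet? io.2 1).getD 0, io.1)) =
      pvPairsFrom orders 1 from (pvPairsFrom_eq_enumerate orders 1).symm]
  obtain ⟨hnd, hbuck, hmem⟩ :=
    pvFoldA_inv orders PySem.Dict.empty 1 (by simp)
  set st := orders.foldl pvStepA (PySem.Dict.empty, 1) with hst
  -- the dict's key list is a permutation of the distinct serve times
  have hkeys_perm : st.1.keys.Perm
      (PySem.List.dedup ((pvPairsFrom orders 1).map (fun p => p.1))) := by
    refine (List.perm_ext_iff_of_nodup hnd
      (by simp [PySem.List.dedup_eq_ofList, PySem.Set.nodup_ofList])).mpr ?_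
    intro k
    rw [hmem k]
    simp [PySem.Dict.keys_empty]
  have hSKnd : (PySem.List.sorted
      (PySem.List.dedup ((pvPairsFrom orders 1).map (fun p => p.1))) (fun k => k)).Nodup :=
    (PySem.List.sorted_perm _ _ _).nodup_iff.mpr (PySem.List.nodup_dedup _)
  have hsorted_keys : PySem.List.sorted st.1.keys (fun k => k) =
      PySem.List.sorted (PySem.List.dedup ((pvPairsFrom orders 1).map (fun p => p.1)))
        (fun k => k) :=
    PySem.List.sorted_eq_sorted_of_perm _ _ _ (fun a b h => h) hkeys_perm
  set SK := PySem.List.sorted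
      (PySem.List.dedup ((pvPairsFrom orders 1).map (fun p => p.1))) (fun k => k) with hSK
  -- A's side: sorted keys, each key contributing its bucket of indices
  rw [PySem.List.foldl_append_singleton_eq_map, PySem.List.foldl_append_eq_flatMap,
    hsorted_keys]
  simp only [List.nil_append, List.flatMap_map]
  -- B's side: tuple sort = sort by the lexicographic key, which is exactly SK's flatMap
  have hsortlex : PySem.List.sorted (pvPairsFrom orders 1) (fun p => toLex p) =
      SK.flatMap (fun k => (pvPairsFrom orders 1).filter (fun p => p.1 == k)) := by
    refine PySem.List.sorted_eq_of_perm_of_pairwise_lt _ _ _ ?_ ?_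
    · refine pvFlatMap_filter_perm _ _ hSKnd ?_
      intro p hp
      rw [hSK, PySem.List.mem_sorted, PySem.List.mem_dedup]
      exact List.mem_map_of_mem hp
    · refine pvFlatMap_filter_pairwise _ _ ?_ (pvPairsFrom_snd_pairwise orders 1)
      rw [hSK]
      simpa [PySem.List.dedup_eq_ofList] using
        PySem.List.sorted_ofList_pairwise_lt ((pvPairsFrom orders 1).map (fun p => p.1))
  rw [pvSorted2_eq_sorted_lex, hsortlex, List.map_flatMap]
  apply List.flatMap_congr
  intro k hk
  have hkmem : k ∈ st.1.keys := by
    rw [hmem k]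
    right
    have := (PySem.List.mem_sorted _ _ _ _).mp hk
    simpa [PySem.List.mem_dedup] using this
  obtain ⟨t, ht⟩ : ∃ t, st.1.get? k = some t := by
    rcases hg : st.1.get? k with _ | t
    · exact absurd ((PySem.Dict.get?_eq_none_iff_not_mem_keys _ _).mp hg) (by simp [hkmem])
    · exact ⟨t, rfl⟩
  have hgetD : st.1.getD k (PvTree.leaf 0) = t := PySem.Dict.getD_of_get?_eq_some _ _ ht
  have hb := hbuck k
  simp only [pvBucket, ht, PySem.Dict.get?_empty] at hb
  rw [hgetD, hb]
  simp
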